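-- pv_equiv track=rewrite | github.com/gpiantoni/gridgen | gridloc/generators.py | index_up_down
-- ===== SOURCE A (Python) =====
-- def index_up_down(n_x, n_y):
--     """Create a generator to return x and y indices starting from the center.
--     See documentation for examples.
--
--     Parameters
--     ----------
--     n_x : int
--         number of rows
--     n_y : int
--         number of columns
--
--     Returns
--     -------
--     generator of tuples
--         each tuple contains the index for the row (x) and the column (y)
--     """
--     y = n_y // 2
--
--     y_sign = -1 if n_y % 2 else 1
--
--     for y_i in range(n_y):
--
--         y += y_sign * y_i
--         y_sign = -y_sign
--
--         x_sign = -1 if n_x % 2 else 1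
--         x = n_x // 2
--
--         for x_i in range(n_x):
--             x += x_sign * x_i
--             x_sign = -x_sign
--             yield (x, y)
-- ===== SOURCE B (Python) =====
-- def at_index(n, k):
--     """k-th element of the center-out sequence for length n, in closed form."""
--     m = (k + 1) // 2
--     return n // 2 + (m if k % 2 == n % 2 else -m)
--
--
-- def index_up_down(n_x, n_y):
--     for j in range(n_y):
--         y = at_index(n_y, j)
--         for i in range(n_x):
--             yield (at_index(n_x, i), y)
-- ===== Notes on version B (the rewrite author's own statement) =====
-- stated objective: alternative
-- what changed: B replaces A's stateful zigzag recurrence (running value and alternating sign carried through the loops) with a closed-form per-index formula at_index(n,k)=n//2+(-1)^(parity)*((k+1)//2), so each coordinate is computed independently from its index with no carried state.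
import Mathlib
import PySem

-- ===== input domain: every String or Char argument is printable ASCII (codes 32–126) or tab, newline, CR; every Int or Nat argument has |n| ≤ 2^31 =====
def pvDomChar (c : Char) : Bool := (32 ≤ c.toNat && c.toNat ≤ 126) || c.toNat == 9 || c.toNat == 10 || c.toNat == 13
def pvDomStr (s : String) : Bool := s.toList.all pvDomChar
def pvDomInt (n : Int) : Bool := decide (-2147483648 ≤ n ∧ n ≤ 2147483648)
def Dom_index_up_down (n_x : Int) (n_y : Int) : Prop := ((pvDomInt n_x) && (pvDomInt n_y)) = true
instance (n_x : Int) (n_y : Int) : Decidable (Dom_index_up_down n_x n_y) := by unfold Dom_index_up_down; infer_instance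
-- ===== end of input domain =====

-- B computes each coordinate by a closed-form formula at_index(n,k) = n//2 ± (k+1)//2 from the
-- index alone, instead of A's stateful zigzag recurrence carrying a running value and sign (alternative).

-- ===== PORT A =====
-- literal port of A: nested loops carrying (value, sign, accumulated output)
def index_up_down (n_x : Int) (n_y : Int) : List (Int × Int) :=
  let y0 := PySem.Int.floordiv n_y 2
  let y_sign0 : Int := if PySem.Int.mod n_y 2 ≠ 0 then -1 else 1
  ((PySem.List.pyRange 0 n_y 1).foldl
    (fun (s : Int × Int × List (Int × Int)) y_i =>
      let y := s.1 + s.2.1 * y_i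
      let y_sign := -s.2.1
      let x_sign0 : Int := if PySem.Int.mod n_x 2 ≠ 0 then -1 else 1
      let x0 := PySem.Int.floordiv n_x 2
      let inner := (PySem.List.pyRange 0 n_x 1).foldl
        (fun (t : Int × Int × List (Int × Int)) x_i =>
          let x := t.1 + t.2.1 * x_i
          (x, -t.2.1, t.2.2 ++ [(x, y)]))
        (x0, x_sign0, s.2.2)
      (y, y_sign, inner.2.2))
    (y0, y_sign0, [])).2.2

-- ===== PORT B =====
-- helper of B: closed-form k-th element of the center-out sequence for length n
def at_index (n : Int) (k : Int) : Int :=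
  PySem.Int.floordiv n 2 +
    (if PySem.Int.mod k 2 = PySem.Int.mod n 2
     then PySem.Int.floordiv (k + 1) 2 else -(PySem.Int.floordiv (k + 1) 2))

def index_up_down_alt (n_x : Int) (n_y : Int) : List (Int × Int) :=
  (PySem.List.pyRange 0 n_y 1).flatMap (fun j =>
    let y := at_index n_y j
    (PySem.List.pyRange 0 n_x 1).map (fun i => (at_index n_x i, y)))

-- ===== PRECONDITION & SPEC =====
def Spec_index_up_down (n_x : Int) (n_y : Int) (out : List (Int × Int)) : Prop := out = index_up_down_alt n_x n_y
instance (n_x : Int) (n_y : Int) (out : List (Int × Int)) : Decidable (Spec_index_up_down n_x n_y out) := by unfold Spec_index_up_down; infer_instance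

-- ===== CLAIM =====
def Claim_equal_index_up_down : Prop := ∀ (n_x : Int) (n_y : Int), Dom_index_up_down n_x n_y → Spec_index_up_down n_x n_y (index_up_down n_x n_y)

-- ===== LEMMAS AND PROOFS =====

-- A's sign after k loop steps over length-n sequence
def sg (n : Int) (k : Int) : Int := if PySem.Int.mod k 2 = PySem.Int.mod n 2 then 1 else -1

-- A's initial sign
def e0 (n : Int) : Int := if PySem.Int.mod n 2 ≠ 0 then -1 else 1

-- A's inner loop body at fixed y
def stepP (y : Int) (t : Int × Int × List (Int × Int)) (i : Int) : Int × Int × List (Int × Int) :=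
  (t.1 + t.2.1 * i, -t.2.1, t.2.2 ++ [(t.1 + t.2.1 * i, y)])

lemma at_index_neg_one (n : Int) : at_index n (-1) = PySem.Int.floordiv n 2 := by
  simp [at_index, PySem.Int.mod, PySem.Int.floordiv]

lemma sg_zero (n : Int) : sg n 0 = e0 n := by
  unfold sg e0
  rw [PySem.Int.mod_eq_emod_of_pos (by norm_num), PySem.Int.mod_eq_emod_of_pos (by norm_num)]
  split_ifs with h1 h2 h2 <;> omega

lemma sg_succ (n : Int) (k : Int) : -(sg n k) = sg n (k + 1) := by
  unfold sg
  rw [PySem.Int.mod_eq_emod_of_pos (by norm_num), PySem.Int.mod_eq_emod_of_pos (by norm_num),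
      PySem.Int.mod_eq_emod_of_pos (by norm_num)]
  split_ifs with h1 h2 h2 <;> omega

lemma at_index_step (n : Int) (k : Int) (hk : 0 ≤ k) :
    at_index n (k - 1) + sg n k * k = at_index n k := by
  unfold at_index sg
  rw [PySem.Int.mod_eq_emod_of_pos (by norm_num), PySem.Int.mod_eq_emod_of_pos (by norm_num),
      PySem.Int.mod_eq_emod_of_pos (by norm_num),
      PySem.Int.floordiv_eq_ediv_of_pos (by norm_num),
      PySem.Int.floordiv_eq_ediv_of_pos (by norm_num),
      PySem.Int.floordiv_eq_ediv_of_pos (by norm_num)]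
  split_ifs with h1 h2 h2 <;> omega

-- inner (1-D) loop invariant: the fold over range(k) from the initial state yields the
-- closed-form last value, sign, and the mapped closed-form sequence appended to the accumulator
lemma inner_inv (n y : Int) (k : ℕ) (acc : List (Int × Int)) :
    (PySem.List.pyRange 0 (k : Int) 1).foldl (stepP y) (PySem.Int.floordiv n 2, e0 n, acc)
      = (at_index n ((k : Int) - 1), sg n (k : Int),
         acc ++ (PySem.List.pyRange 0 (k : Int) 1).map (fun i => (at_index n i, y))) := by
  induction k with
  | zero =>
    rw [PySem.List.pyRange_one_eq_nil (by norm_num)]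
    simp [at_index_neg_one, sg_zero]
  | succ k ih =>
    have hcast : ((k + 1 : ℕ) : Int) = (k : Int) + 1 := by push_cast; ring
    rw [hcast, PySem.List.pyRange_one_succ_right (by positivity), List.foldl_append, ih]
    simp only [List.foldl_cons, List.foldl_nil, stepP]
    refine Prod.ext ?_ (Prod.ext ?_ ?_) <;> simp
    · rw [at_index_step n (k : Int) (by positivity)]
    · rw [sg_succ]
    · rw [at_index_step n (k : Int) (by positivity)]

-- only the output component, for an arbitrary Int bound
lemma inner_out (n_x y : Int) (acc : List (Int × Int)) :
    ((PySem.List.pyRange 0 n_x 1).foldl (stepP y)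
        (PySem.Int.floordiv n_x 2, e0 n_x, acc)).2.2
      = acc ++ (PySem.List.pyRange 0 n_x 1).map (fun i => (at_index n_x i, y)) := by
  rcases le_or_gt n_x 0 with h | h
  · rw [PySem.List.pyRange_one_eq_nil h]; simp
  · have : n_x = (n_x.toNat : Int) := by omega
    rw [this, inner_inv]

-- A's outer loop body
def stepO (n_x : Int) (s : Int × Int × List (Int × Int)) (y_i : Int) : Int × Int × List (Int × Int) :=
  (s.1 + s.2.1 * y_i, -s.2.1,
    ((PySem.List.pyRange 0 n_x 1).foldl (stepP (s.1 + s.2.1 * y_i))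
      (PySem.Int.floordiv n_x 2, e0 n_x, s.2.2)).2.2)

lemma outer_inv (n_x n_y : Int) (k : ℕ) (acc : List (Int × Int)) :
    (PySem.List.pyRange 0 (k : Int) 1).foldl (stepO n_x) (PySem.Int.floordiv n_y 2, e0 n_y, acc)
      = (at_index n_y ((k : Int) - 1), sg n_y (k : Int),
         acc ++ (PySem.List.pyRange 0 (k : Int) 1).flatMap
           (fun j => (PySem.List.pyRange 0 n_x 1).map (fun i => (at_index n_x i, at_index n_y j)))) := by
  induction k with
  | zero =>
    rw [PySem.List.pyRange_one_eq_nil (by norm_num)]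
    simp [at_index_neg_one, sg_zero]
  | succ k ih =>
    have hcast : ((k + 1 : ℕ) : Int) = (k : Int) + 1 := by push_cast; ring
    rw [hcast, PySem.List.pyRange_one_succ_right (by positivity), List.foldl_append, ih]
    simp only [List.foldl_cons, List.foldl_nil, stepO]
    rw [inner_out]
    refine Prod.ext ?_ (Prod.ext ?_ ?_) <;> simp
    · rw [at_index_step n_y (k : Int) (by positivity)]
    · rw [sg_succ]
    · rw [at_index_step n_y (k : Int) (by positivity)]
      simp

lemma outer_out (n_x n_y : Int) :
    ((PySem.List.pyRange 0 n_y 1).foldl (stepO n_x)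
        (PySem.Int.floordiv n_y 2, e0 n_y, ([] : List (Int × Int)))).2.2
      = (PySem.List.pyRange 0 n_y 1).flatMap
          (fun j => (PySem.List.pyRange 0 n_x 1).map (fun i => (at_index n_x i, at_index n_y j))) := by
  rcases le_or_gt n_y 0 with h | h
  · rw [PySem.List.pyRange_one_eq_nil h]; simp
  · have : n_y = (n_y.toNat : Int) := by omega
    rw [this, outer_inv]; simp

-- ===== VERDICT =====
theorem index_up_down_spec : Claim_equal_index_up_down := by
  intro n_x n_y _
  show index_up_down n_x n_y = index_up_down_alt n_x n_y
  show ((PySem.List.pyRange 0 n_y 1).foldl (stepO n_x)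
      (PySem.Int.floordiv n_y 2, e0 n_y, ([] : List (Int × Int)))).2.2
    = index_up_down_alt n_x n_y
  rw [outer_out]
  rfl
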